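-- pv_equiv track=rewrite | github.com/hyfi06/pcic-gcoc | choosek_py/choosek.py | choosek_gray
-- ===== SOURCE A (Python) =====
-- def choosek_gray(L, k):
--     n = len(L)
--     assert (n >= k)
--     if k == 0:
--         yield []
--     elif k == n:
--         yield L
--     else:
--         for s in choosek_gray(L[1:], k-1):
--             yield [L[0]] + s
--         for s in reversed([x for x in choosek_gray(L[1:], k)]):
--             yield s
-- ===== SOURCE B (Python) =====
-- def choosek_gray(L, k):
--     # Bottom-up dynamic programming over suffixes of L (no recursion):
--     # row[j] is the Gray-code j-subset sequence of the current suffix,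
--     # keeping only the columns j <= k that the answer depends on.
--     K = max(k, 0)
--     row = [[[]]]                       # empty suffix: only j = 0
--     for i in range(len(L) - 1, -1, -1):
--         new = [[[]]]
--         for j in range(1, min(len(row), K) + 1):
--             above = row[j] if j < len(row) else []
--             new.append([[L[i]] + s for s in row[j - 1]] + above[::-1])
--         row = new
--     if 0 <= k < len(row):
--         yield from row[k]
-- ===== Notes on version B (the rewrite author's own statement) =====
-- stated objective: alternative
-- what changed: B replaces A's top-down recursion (with per-level materialize-and-reverse) by an iterative bottom-up dynamic-programming fold over the suffixes of L, building a row of subset sequences for the needed columns 0..k at once; Pre_ excludes k>len(L) (A raises AssertionError) and k<0 (A recurses forever).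
import Mathlib
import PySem

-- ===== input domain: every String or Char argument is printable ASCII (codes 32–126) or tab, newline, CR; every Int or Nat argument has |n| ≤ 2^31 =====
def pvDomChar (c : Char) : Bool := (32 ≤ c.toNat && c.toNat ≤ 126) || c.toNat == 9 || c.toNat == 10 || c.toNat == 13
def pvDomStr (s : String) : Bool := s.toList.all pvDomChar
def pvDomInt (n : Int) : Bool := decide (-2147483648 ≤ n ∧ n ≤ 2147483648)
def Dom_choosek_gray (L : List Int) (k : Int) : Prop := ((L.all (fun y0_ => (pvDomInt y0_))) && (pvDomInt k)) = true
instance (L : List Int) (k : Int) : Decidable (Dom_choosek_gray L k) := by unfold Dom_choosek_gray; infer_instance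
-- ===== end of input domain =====

-- B replaces A's top-down recursion (with per-level materialize-and-reverse) by an iterative bottom-up DP fold over suffixes of L (alternative decomposition, same cost).


-- ===== PORT A =====
-- Port of A; list of yielded values. On [] with k ≠ 0 Python raises/diverges (outside Pre_), port returns [].
def choosek_gray : List Int → Int → List (List Int)
  | L, k =>
    if k = 0 then [[]]
    else if k = (L.length : Int) then [L]
    else match L with
      | [] => []
      | a :: t =>
        (choosek_gray t (k - 1)).map (fun s => a :: s) ++ (choosek_gray t k).reverse
termination_by L _ => L.length

-- ===== PORT B =====
-- one DP step: from the row of sequences for a suffix (columns 0..K), the row for (a :: suffix)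
def grayStep (K : Nat) (a : Int) (row : List (List (List Int))) : List (List (List Int)) :=
  [[]] :: (List.range (min row.length K)).map
    (fun i => (row.getD i []).map (fun s => a :: s) ++ (row.getD (i + 1) []).reverse)

def choosek_gray_alt (L : List Int) (k : Int) : List (List Int) :=
  let row := L.foldr (grayStep k.toNat) [[[]]]
  if 0 ≤ k ∧ k < (row.length : Int) then row.getD k.toNat [] else []

-- ===== PRECONDITION & SPEC =====
-- Pre_ excludes k > len(L) (Python A's assert raises AssertionError) and k < 0 (A recurses forever).
def Pre_choosek_gray (L : List Int) (k : Int) : Prop := 0 ≤ k ∧ k ≤ (L.length : Int)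
instance (L : List Int) (k : Int) : Decidable (Pre_choosek_gray L k) := by unfold Pre_choosek_gray; infer_instance
def pvWitness_choosek_gray : List Int × Int := ([1, 2, 3], 2)
def Spec_choosek_gray (L : List Int) (k : Int) (out : List (List Int)) : Prop := out = choosek_gray_alt L k
instance (L : List Int) (k : Int) (out : List (List Int)) : Decidable (Spec_choosek_gray L k out) := by unfold Spec_choosek_gray; infer_instance

-- ===== CLAIM (what is proved, stated in full; the proofs are below) =====
def Claim_equal_choosek_gray : Prop := ∀ (L : List Int) (k : Int), Dom_choosek_gray L k → Pre_choosek_gray L k → Spec_choosek_gray L k (choosek_gray L k)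

-- ===== LEMMAS AND PROOFS =====

-- the expected row over a suffix: A's result for every column 0..min(length,K)
def rowSpec (K : Nat) (L : List Int) : List (List (List Int)) :=
  (List.range (min L.length K + 1)).map (fun j : Nat => choosek_gray L (j : Int))

theorem choosek_gray_zero (L : List Int) : choosek_gray L 0 = [[]] := by
  cases L <;> (rw [choosek_gray]; simp)

theorem choosek_gray_gt : ∀ (L : List Int) (k : Int), (L.length : Int) < k → choosek_gray L k = [] := by
  intro L
  induction L with
  | nil =>
    intro k h
    simp only [List.length_nil, Nat.cast_zero] at h
    rw [choosek_gray]
    rw [if_neg (by omega), if_neg (by simp; omega)]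
  | cons a t ih =>
    intro k h
    simp only [List.length_cons] at h
    have h' : ((t.length : Int) + 1) < k := by push_cast at h ⊢; omega
    rw [choosek_gray]
    rw [if_neg (by omega), if_neg (by simp only [List.length_cons]; push_cast; omega)]
    rw [ih k (by omega), ih (k - 1) (by omega)]
    simp

theorem choosek_gray_len (L : List Int) : choosek_gray L (L.length : Int) = [L] := by
  cases L with
  | nil => rw [choosek_gray]; simp
  | cons a t =>
    rw [choosek_gray]
    rw [if_neg (by simp only [List.length_cons]; push_cast; omega), if_pos rfl]

-- A's recursion in its general form, valid for all 1 ≤ k ≤ length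
theorem choosek_gray_cons (a : Int) (t : List Int) (k : Int) (h1 : k ≠ 0)
    (h2 : k ≤ (t.length : Int) + 1) :
    choosek_gray (a :: t) k
      = (choosek_gray t (k - 1)).map (fun s => a :: s) ++ (choosek_gray t k).reverse := by
  by_cases hn : k = (t.length : Int) + 1
  · subst hn
    rw [show ((t.length : Int) + 1 - 1) = (t.length : Int) from by ring]
    rw [choosek_gray_len t, choosek_gray_gt t ((t.length : Int) + 1) (by omega)]
    rw [show ((t.length : Int) + 1) = ((a :: t).length : Int) from by simp]
    rw [choosek_gray_len (a :: t)]
    simp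
  · rw [choosek_gray]
    rw [if_neg h1, if_neg (by simp; omega)]

theorem rowSpec_getD (K : Nat) (t : List Int) (i : Nat) (hiK : i ≤ K) :
    (rowSpec K t).getD i [] = choosek_gray t (i : Int) := by
  unfold rowSpec
  by_cases hi : i < min t.length K + 1
  · rw [List.getD_eq_getElem _ _ (by simpa using hi)]
    simp
  · rw [List.getD_eq_default _ _ (by simp; omega)]
    exact (choosek_gray_gt t (i : Int) (by omega)).symm

-- invariant of the fold: the row over a suffix lists A's results for every column
theorem foldr_grayStep (K : Nat) (L : List Int) : L.foldr (grayStep K) [[[]]] = rowSpec K L := by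
  induction L with
  | nil =>
    unfold rowSpec
    simp [List.range_succ, choosek_gray_zero]
  | cons a t ih =>
    show grayStep K a (t.foldr (grayStep K) [[[]]]) = rowSpec K (a :: t)
    rw [ih]
    unfold grayStep
    have hlen : (rowSpec K t).length = min t.length K + 1 := by unfold rowSpec; simp
    rw [hlen]
    have hmin : min (min t.length K + 1) K = min (t.length + 1) K := by omega
    rw [hmin]
    have hr : rowSpec K (a :: t)
        = choosek_gray (a :: t) ((0 : Nat) : Int)
          :: (List.range (min (t.length + 1) K)).map
               (fun i : Nat => choosek_gray (a :: t) ((Nat.succ i : Nat) : Int)) := by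
      unfold rowSpec
      rw [show min (a :: t).length K + 1 = min (t.length + 1) K + 1 from by simp]
      rw [List.range_succ_eq_map]
      simp [Function.comp]
    rw [hr]
    congr 1
    · simp [choosek_gray_zero]
    · apply List.map_congr_left
      intro i hi
      have hi' : i < min (t.length + 1) K := List.mem_range.mp hi
      rw [rowSpec_getD K t i (by omega), rowSpec_getD K t (i + 1) (by omega)]
      rw [choosek_gray_cons a t ((Nat.succ i : Nat) : Int) (by omega)
            (by push_cast; omega)]
      rw [show (((Nat.succ i : Nat) : Int) - 1) = (i : Int) from by push_cast; ring]

-- ===== VERDICT (by name: the statement is the Claim_ definition above) =====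
theorem choosek_gray_spec : Claim_equal_choosek_gray := by
  intro L k _ hpre
  obtain ⟨hk0, hkl⟩ := hpre
  unfold Spec_choosek_gray choosek_gray_alt
  simp only [foldr_grayStep]
  have hlen : (rowSpec k.toNat L).length = min L.length k.toNat + 1 := by unfold rowSpec; simp
  rw [if_pos ⟨hk0, by rw [hlen]; push_cast; omega⟩]
  rw [rowSpec_getD k.toNat L k.toNat (le_refl _)]
  rw [Int.toNat_of_nonneg hk0]
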